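-- pv_equiv track=rewrite | github.com/reinhardtsean/Python-HW-Examples | project7_fifteen_game_solver.py | zone1
-- ===== SOURCE A (Python) =====
-- def zone1(zero_pos, c_pos):
--     """
--     Zone 1 Helper Function
--     """
--     moves = ''
--     over = zero_pos[1] - c_pos[1]
--     #move the zero tile over the target tile
--     for dummy_o in range(over):
--         moves += 'l'
--     over -= 1
--     while over > 0:
--         moves += 'urrdl'
--         over -= 1
--     return moves
-- ===== SOURCE B (Python) =====
-- def zone1(zero_pos, c_pos):
--     """Zone 1 Helper Function (closed-form version)."""
--     over = zero_pos[1] - c_pos[1]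
--     return 'l' * over + 'urrdl' * (over - 1)
-- ===== Notes on version B (the rewrite author's own statement) =====
-- stated objective: simpler
-- what changed: Replaced the for-loop of 'l' appends and the while-loop of 'urrdl' appends by a single closed-form string expression 'l'*over + 'urrdl'*(over-1).
import Mathlib
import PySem

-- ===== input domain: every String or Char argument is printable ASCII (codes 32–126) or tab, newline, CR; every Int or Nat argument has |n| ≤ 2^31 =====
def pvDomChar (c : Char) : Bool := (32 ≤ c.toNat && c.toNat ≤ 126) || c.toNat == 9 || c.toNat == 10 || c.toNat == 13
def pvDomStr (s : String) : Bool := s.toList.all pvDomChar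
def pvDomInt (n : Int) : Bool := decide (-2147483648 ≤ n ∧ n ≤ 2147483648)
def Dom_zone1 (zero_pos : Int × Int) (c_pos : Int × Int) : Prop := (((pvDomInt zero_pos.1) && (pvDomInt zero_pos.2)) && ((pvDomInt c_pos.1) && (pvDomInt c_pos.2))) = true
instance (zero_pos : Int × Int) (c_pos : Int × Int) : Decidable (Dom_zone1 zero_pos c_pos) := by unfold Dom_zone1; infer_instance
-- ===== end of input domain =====

-- B replaces A's two accumulation loops by one closed-form string expression 'l'*ov + 'urrdl'*(ov-1); objective: simpler.


-- ===== PORT A =====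
-- the 'while ov > 0: moves += "urrdl"; ov -= 1' loop of A
def zone1While (ov : Int) (moves : String) : String :=
  if _h : ov > 0 then zone1While (ov - 1) (moves ++ "urrdl") else moves
termination_by ov.toNat
decreasing_by omega

def zone1 (zero_pos : Int × Int) (c_pos : Int × Int) : String :=
  let moves := ""
  let ov := zero_pos.2 - c_pos.2
  -- for dummy_o in range(over): moves += 'l'
  let moves := (PySem.List.pyRange 0 ov 1).foldl (fun m _ => m ++ "l") moves
  let ov := ov - 1
  zone1While ov moves

-- ===== PORT B =====
-- Python 's * n' (empty for n ≤ 0)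
def pyStrMul (s : String) (n : Int) : String :=
  String.join (List.replicate n.toNat s)

def zone1_alt (zero_pos : Int × Int) (c_pos : Int × Int) : String :=
  let ov := zero_pos.2 - c_pos.2
  pyStrMul "l" ov ++ pyStrMul "urrdl" (ov - 1)

-- ===== PRECONDITION & SPEC =====
def Spec_zone1 (zero_pos : Int × Int) (c_pos : Int × Int) (out : String) : Prop := out = zone1_alt zero_pos c_pos
instance (zero_pos : Int × Int) (c_pos : Int × Int) (out : String) : Decidable (Spec_zone1 zero_pos c_pos out) := by unfold Spec_zone1; infer_instance

-- ===== CLAIM (what is proved, stated in full; the proofs are below) =====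
def Claim_equal_zone1 : Prop := ∀ (zero_pos : Int × Int) (c_pos : Int × Int), Dom_zone1 zero_pos c_pos → Spec_zone1 zero_pos c_pos (zone1 zero_pos c_pos)

-- ===== LEMMAS AND PROOFS =====
theorem str_foldl_append (l : List String) : ∀ (x y : String),
    l.foldl (· ++ ·) (x ++ y) = x ++ l.foldl (· ++ ·) y := by
  induction l with
  | nil => simp
  | cons a t ih => intro x y; simp only [List.foldl]; rw [String.append_assoc, ih]

theorem join_replicate_succ (k : Nat) (s : String) :
    String.join (List.replicate (k + 1) s) = s ++ String.join (List.replicate k s) := by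
  simp only [List.replicate_succ, String.join]
  have h : ("" : String) ++ s = s ++ "" := by simp
  simp only [List.foldl, h, str_foldl_append]

theorem foldl_append_const {α : Type} (l : List α) (s m : String) :
    l.foldl (fun m _ => m ++ s) m = m ++ String.join (List.replicate l.length s) := by
  induction l generalizing m with
  | nil => simp [String.join]
  | cons a t ih =>
      simp only [List.foldl, List.length_cons, ih, join_replicate_succ]
      rw [← String.append_assoc]

theorem zone1While_eq (k : Nat) : ∀ (n : Int), n.toNat = k → ∀ (m : String),
    zone1While n m = m ++ String.join (List.replicate n.toNat "urrdl") := by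
  induction k with
  | zero =>
      intro n hn m
      rw [zone1While]
      have h0 : ¬ n > 0 := by omega
      simp [h0, hn, String.join]
  | succ k ih =>
      intro n hn m
      rw [zone1While]
      have hpos : n > 0 := by omega
      have h1 : (n - 1).toNat = k := by omega
      simp only [hpos, dif_pos, ih (n - 1) h1]
      have h2 : n.toNat = (n - 1).toNat + 1 := by omega
      rw [h2, join_replicate_succ, ← String.append_assoc]

-- ===== VERDICT (by name: the statement is the Claim_ definition above) =====
theorem zone1_spec : Claim_equal_zone1 := by
  intro zp cp _
  unfold Spec_zone1 zone1 zone1_alt pyStrMul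
  simp only [foldl_append_const, PySem.List.length_pyRange_one,
    zone1While_eq ((zp.2 - cp.2 - 1).toNat) _ rfl]
  simp
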